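-- pv_equiv track=rewrite | github.com/VON0000/GAP | taxiingtime_matrix.py | cost_remote
-- ===== SOURCE A (Python) =====
-- def cost_remote(g, initgate, interval_index, i, no_1, no_2, no_3, no_4, target_matrix):
--     localgate = g[interval_index.index(i)]
--     if localgate in no_3:
--         alpha = 1000 * 1000
--
--         if initgate:
--             temp = no_1 + no_2  # 近机位的集合
--             if initgate in temp:
--
--                 # 近机位
--                 for k in temp:
--                     target_matrix[i][k] = 0 * alpha + target_matrix[i][k]
--
--                 # 远机位
--                 rest = no_3 + no_4
--                 for k in rest:
--                     target_matrix[i][k] = 10 * alpha + target_matrix[i][k]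
--
--                 # 本机位
--                 target_matrix[i][localgate] = - 9 * alpha + target_matrix[i][localgate]
--             else:
--                 # 近机位
--                 for k in temp:
--                     target_matrix[i][k] = 1 * alpha + target_matrix[i][k]
--
--                 # 远机位
--                 rest = no_3 + no_4
--                 for k in rest:
--                     target_matrix[i][k] = 10 * alpha + target_matrix[i][k]
--
--                 # 本机位
--                 target_matrix[i][localgate] = - 10 * alpha + target_matrix[i][localgate]
--         else:
--             # 近机位
--             temp = no_1 + no_2
--             for k in temp:
--                 target_matrix[i][k] = 0 * alpha + target_matrix[i][k]
--
--             # 远机位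
--             rest = no_3 + no_4
--             for k in rest:
--                 target_matrix[i][k] = 10 * alpha + target_matrix[i][k]
--
--             # 本机位
--             target_matrix[i][localgate] = - 9 * alpha + target_matrix[i][localgate]
--     return target_matrix
-- ===== SOURCE B (Python) =====
-- def cost_remote(g, initgate, interval_index, i, no_1, no_2, no_3, no_4, target_matrix):
--     localgate = g[interval_index.index(i)]
--     if localgate not in no_3:
--         return target_matrix
--     alpha = 1000 * 1000
--     near = no_1 + no_2
--     rest = no_3 + no_4
--     extra = bool(initgate) and initgate not in near
--
--     def delta(k):
--         return ((alpha if extra else 0) * near.count(k)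
--                 + 10 * alpha * rest.count(k)
--                 + ((-10 if extra else -9) * alpha if k == localgate else 0))
--
--     target_matrix[i] = {k: v + delta(k) for k, v in target_matrix[i].items()}
--     return target_matrix
-- ===== Notes on version B (the rewrite author's own statement) =====
-- stated objective: alternative
-- what changed: A mutates the row gate-by-gate through three duplicated nested branches of sequential update loops; B instead computes a closed-form per-key delta from occurrence counts (near.count(k), rest.count(k), a local-gate term) and rebuilds the row in one dict-comprehension pass, trading the in-place loops for a count-based formula.
-- outside the precondition, e.g. on cost_remote([2], None, [2], 2, [], [], [2], [], {2: {}}): A raises KeyError, B returns {2: {}}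
import Mathlib
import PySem

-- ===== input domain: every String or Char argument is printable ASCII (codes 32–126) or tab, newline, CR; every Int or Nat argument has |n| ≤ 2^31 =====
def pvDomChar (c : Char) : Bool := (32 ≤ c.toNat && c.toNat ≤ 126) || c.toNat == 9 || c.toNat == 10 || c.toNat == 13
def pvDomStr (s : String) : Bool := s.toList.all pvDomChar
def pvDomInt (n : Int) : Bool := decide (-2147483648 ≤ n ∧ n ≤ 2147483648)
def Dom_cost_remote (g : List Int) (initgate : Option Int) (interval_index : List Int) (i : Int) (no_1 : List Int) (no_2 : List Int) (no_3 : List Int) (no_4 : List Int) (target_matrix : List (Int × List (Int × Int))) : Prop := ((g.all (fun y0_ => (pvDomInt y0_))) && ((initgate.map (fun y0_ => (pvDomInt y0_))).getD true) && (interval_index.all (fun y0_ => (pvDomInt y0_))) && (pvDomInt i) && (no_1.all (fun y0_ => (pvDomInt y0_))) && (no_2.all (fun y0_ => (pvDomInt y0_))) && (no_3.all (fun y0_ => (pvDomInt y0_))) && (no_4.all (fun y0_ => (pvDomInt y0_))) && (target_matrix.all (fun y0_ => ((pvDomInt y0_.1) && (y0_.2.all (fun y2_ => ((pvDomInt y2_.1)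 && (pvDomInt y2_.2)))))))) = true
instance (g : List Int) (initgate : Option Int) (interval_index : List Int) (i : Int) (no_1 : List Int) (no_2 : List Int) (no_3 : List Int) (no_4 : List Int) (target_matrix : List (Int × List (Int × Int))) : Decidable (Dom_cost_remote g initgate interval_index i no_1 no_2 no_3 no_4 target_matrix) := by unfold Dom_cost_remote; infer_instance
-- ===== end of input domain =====

-- ===== PORT A =====
-- B replaces A's sequential gate-by-gate row mutation by a closed-form per-key delta applied in one
-- rebuild pass (alternative decomposition, not claimed faster); the Python mutates target_matrix in
-- place — the equivalence proved here is about the RETURN value.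
def cost_remote (g : List Int) (initgate : Option Int) (interval_index : List Int) (i : Int) (no_1 : List Int) (no_2 : List Int) (no_3 : List Int) (no_4 : List Int) (target_matrix : List (Int × List (Int × Int))) : List (Int × List (Int × Int)) :=
  match PySem.List.index? interval_index i with
  | none => target_matrix          -- ValueError: excluded by Pre_
  | some idx =>
    match PySem.List.pyGet? g (idx : Int) with
    | none => target_matrix        -- IndexError: excluded by Pre_
    | some localgate =>
      if localgate ∈ no_3 then
        let alpha : Int := 1000 * 1000
        let tm : PySem.Dict Int (List (Int × Int)) := PySem.Dict.mk target_matrix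
        let row : PySem.Dict Int Int := PySem.Dict.mk (tm.getD i [])   -- KeyError on missing key: excluded by Pre_
        let row' : PySem.Dict Int Int :=
          if initgate.getD 0 ≠ 0 then   -- `if initgate:` — falsy for None and 0
            let temp := no_1 ++ no_2
            if initgate.getD 0 ∈ temp then
              let r1 := temp.foldl (fun r k => r.insert k (0 * alpha + r.getD k 0)) row
              let rest := no_3 ++ no_4
              let r2 := rest.foldl (fun r k => r.insert k (10 * alpha + r.getD k 0)) r1
              r2.insert localgate (-9 * alpha + r2.getD localgate 0)
            else
              let r1 := temp.foldl (fun r k => r.insert k (1 * alpha + r.getD k 0)) row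
              let rest := no_3 ++ no_4
              let r2 := rest.foldl (fun r k => r.insert k (10 * alpha + r.getD k 0)) r1
              r2.insert localgate (-10 * alpha + r2.getD localgate 0)
          else
            let temp := no_1 ++ no_2
            let r1 := temp.foldl (fun r k => r.insert k (0 * alpha + r.getD k 0)) row
            let rest := no_3 ++ no_4
            let r2 := rest.foldl (fun r k => r.insert k (10 * alpha + r.getD k 0)) r1
            r2.insert localgate (-9 * alpha + r2.getD localgate 0)
        (tm.insert i row'.items).items
      else target_matrix

-- ===== PORT B =====
def cost_remote_alt (g : List Int) (initgate : Option Int) (interval_index : List Int) (i : Int) (no_1 : List Int) (no_2 : List Int) (no_3 : List Int) (no_4 : List Int) (target_matrix : List (Int × List (Int × Int))) : List (Int × List (Int × Int)) :=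
  match PySem.List.index? interval_index i with
  | none => target_matrix
  | some idx =>
    match PySem.List.pyGet? g (idx : Int) with
    | none => target_matrix
    | some localgate =>
      if localgate ∉ no_3 then target_matrix
      else
        let alpha : Int := 1000 * 1000
        let near := no_1 ++ no_2
        let rest := no_3 ++ no_4
        -- `extra = bool(initgate) and initgate not in near` (None and 0 are falsy)
        let extra : Prop := initgate.getD 0 ≠ 0 ∧ initgate.getD 0 ∉ near
        let delta : Int → Int := fun k =>
          (if extra then alpha else 0) * (PySem.List.count near k : Int)
          + 10 * alpha * (PySem.List.count rest k : Int)
          + (if k = localgate then (if extra then (-10 : Int) else -9) * alpha else 0)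
        let tm : PySem.Dict Int (List (Int × Int)) := PySem.Dict.mk target_matrix
        let row := tm.getD i []
        (tm.insert i (row.map (fun p => (p.1, p.2 + delta p.1)))).items

-- ===== PRECONDITION & SPEC =====
-- Pre_ excludes exactly the inputs on which the Python raises (ValueError: i not in interval_index;
-- IndexError: the found index out of range of g; KeyError: when the local gate is remote, i missing from
-- target_matrix or an updated gate key missing from its row) and assoc lists with duplicate keys, which
-- no Python dict argument can produce.
def Pre_cost_remote (g : List Int) (initgate : Option Int) (interval_index : List Int) (i : Int) (no_1 : List Int) (no_2 : List Int) (no_3 : List Int) (no_4 : List Int) (target_matrix : List (Int × List (Int × Int))) : Prop :=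
  i ∈ interval_index ∧ interval_index.idxOf i < g.length ∧
  (target_matrix.map Prod.fst).Nodup ∧ (∀ p ∈ target_matrix, (p.2.map Prod.fst).Nodup) ∧
  (g.getD (interval_index.idxOf i) 0 ∈ no_3 →
    i ∈ target_matrix.map Prod.fst ∧
    ∀ k ∈ no_1 ++ no_2 ++ no_3 ++ no_4,
      k ∈ (((PySem.Dict.mk target_matrix).getD i []).map Prod.fst))
instance (g : List Int) (initgate : Option Int) (interval_index : List Int) (i : Int) (no_1 : List Int) (no_2 : List Int) (no_3 : List Int) (no_4 : List Int) (target_matrix : List (Int × List (Int × Int))) : Decidable (Pre_cost_remote g initgate interval_index i no_1 no_2 no_3 no_4 target_matrix) := by unfold Pre_cost_remote; infer_instance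

def pvWitness_cost_remote : List Int × Option Int × List Int × Int × List Int × List Int × List Int × List Int × (List (Int × List (Int × Int))) :=
  ([5], none, [0], 0, [1], [], [5], [], [(0, [(1, 0), (5, 0)])])

def Spec_cost_remote (g : List Int) (initgate : Option Int) (interval_index : List Int) (i : Int) (no_1 : List Int) (no_2 : List Int) (no_3 : List Int) (no_4 : List Int) (target_matrix : List (Int × List (Int × Int))) (out : List (Int × List (Int × Int))) : Prop := out = cost_remote_alt g initgate interval_index i no_1 no_2 no_3 no_4 target_matrix
instance (g : List Int) (initgate : Option Int) (interval_index : List Int) (i : Int) (no_1 : List Int) (no_2 : List Int) (no_3 : List Int) (no_4 : List Int) (target_matrix : List (Int × List (Int × Int))) (out : List (Int × List (Int × Int))) : Decidable (Spec_cost_remote g initgate interval_index i no_1 no_2 no_3 no_4 target_matrix out) := by unfold Spec_cost_remote; infer_instance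

-- ===== CLAIM (what is proved, stated in full; the proofs are below) =====
def Claim_equal_cost_remote : Prop := ∀ (g : List Int) (initgate : Option Int) (interval_index : List Int) (i : Int) (no_1 : List Int) (no_2 : List Int) (no_3 : List Int) (no_4 : List Int) (target_matrix : List (Int × List (Int × Int))), Dom_cost_remote g initgate interval_index i no_1 no_2 no_3 no_4 target_matrix → Pre_cost_remote g initgate interval_index i no_1 no_2 no_3 no_4 target_matrix → Spec_cost_remote g initgate interval_index i no_1 no_2 no_3 no_4 target_matrix (cost_remote g initgate interval_index i no_1 no_2 no_3 no_4 target_matrix)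

-- ===== LEMMAS AND PROOFS =====
theorem pvWitness_ok :
    Dom_cost_remote (pvWitness_cost_remote.1) (pvWitness_cost_remote.2.1) (pvWitness_cost_remote.2.2.1) (pvWitness_cost_remote.2.2.2.1) (pvWitness_cost_remote.2.2.2.2.1) (pvWitness_cost_remote.2.2.2.2.2.1) (pvWitness_cost_remote.2.2.2.2.2.2.1) (pvWitness_cost_remote.2.2.2.2.2.2.2.1) (pvWitness_cost_remote.2.2.2.2.2.2.2.2) ∧
    Pre_cost_remote (pvWitness_cost_remote.1) (pvWitness_cost_remote.2.1) (pvWitness_cost_remote.2.2.1) (pvWitness_cost_remote.2.2.2.1) (pvWitness_cost_remote.2.2.2.2.1) (pvWitness_cost_remote.2.2.2.2.2.1) (pvWitness_cost_remote.2.2.2.2.2.2.1) (pvWitness_cost_remote.2.2.2.2.2.2.2.1) (pvWitness_cost_remote.2.2.2.2.2.2.2.2) := by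
  decide

-- a `for k in l: row[k] = c + row[k]` loop over keys already present adds c per occurrence of each key
theorem pv_foldl_addc (l : List Int) (c : Int) (d : PySem.Dict Int Int)
    (hnd : d.keys.Nodup) (hc : ∀ k ∈ l, d.contains k = true) :
    (l.foldl (fun r k => r.insert k (c + r.getD k 0)) d).items
      = d.items.map (fun q => (q.1, q.2 + c * (List.count q.1 l : Int))) := by
  induction l generalizing d with
  | nil => simp
  | cons k rest ih =>
    have hk : d.contains k = true := hc k (by simp)
    have hitems : (d.insert k (c + d.getD k 0)).items
        = d.items.map (fun p => if p.1 == k then (k, c + d.getD k 0) else p) :=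
      PySem.Dict.items_insert_of_contains d _ hk
    have hkeys : (d.insert k (c + d.getD k 0)).keys = d.keys := by
      simp only [PySem.Dict.keys, hitems, List.map_map]
      refine List.map_congr_left ?_
      intro p _
      by_cases hpk : p.1 = k <;> simp [hpk]
    have hnd' : (d.insert k (c + d.getD k 0)).keys.Nodup := by rw [hkeys]; exact hnd
    have hc' : ∀ j ∈ rest, (d.insert k (c + d.getD k 0)).contains j = true := by
      intro j hj
      rw [PySem.Dict.contains_iff_mem_keys, hkeys, ← PySem.Dict.contains_iff_mem_keys]
      exact hc j (by simp [hj])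
    rw [List.foldl_cons, ih _ hnd' hc', hitems, List.map_map]
    refine List.map_congr_left ?_
    intro p hp
    by_cases hpk : p.1 = k
    · have hv : d.getD k 0 = p.2 := by
        refine PySem.Dict.getD_of_mem_items d ?_ hnd 0
        have : p = (k, p.2) := by rw [← hpk]
        rw [← this]; exact hp
      simp only [Function.comp_apply, hpk, beq_self_eq_true, if_pos, hv,
        List.count_cons_self]
      exact congrArg (Prod.mk k) (by push_cast; ring)
    · have hcnt : List.count p.1 (k :: rest) = List.count p.1 rest := by
        simp [List.count_cons, Ne.symm hpk]
      simp [hpk, hcnt]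

-- the whole remote-gate update (two add-loops then the local-gate write) as one map over the row
theorem pv_stage3 (c1 c2 lc lg : Int) (near rest : List Int) (row : List (Int × Int))
    (hnd : (row.map Prod.fst).Nodup)
    (hkn : ∀ k ∈ near, k ∈ row.map Prod.fst)
    (hkr : ∀ k ∈ rest, k ∈ row.map Prod.fst)
    (hlg : lg ∈ row.map Prod.fst) :
    ((rest.foldl (fun r k => r.insert k (c2 + r.getD k 0))
        (near.foldl (fun r k => r.insert k (c1 + r.getD k 0)) (PySem.Dict.mk row))).insert lg
      (lc + (rest.foldl (fun r k => r.insert k (c2 + r.getD k 0))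
        (near.foldl (fun r k => r.insert k (c1 + r.getD k 0)) (PySem.Dict.mk row))).getD lg 0)).items
    = row.map (fun q => (q.1, q.2 + (c1 * (List.count q.1 near : Int)
        + c2 * (List.count q.1 rest : Int) + (if q.1 = lg then lc else 0)))) := by
  have hnd0 : (PySem.Dict.mk row).keys.Nodup := hnd
  have hc0 : ∀ k ∈ near, (PySem.Dict.mk row).contains k = true := by
    intro k hk; rw [PySem.Dict.contains_iff_mem_keys]; exact hkn k hk
  have e1 := pv_foldl_addc near c1 (PySem.Dict.mk row) hnd0 hc0
  set d1 := near.foldl (fun r k => r.insert k (c1 + r.getD k 0)) (PySem.Dict.mk row) with hd1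
  have hkeys1 : d1.keys = row.map Prod.fst := by
    simp only [PySem.Dict.keys, e1, List.map_map]
    rfl
  have hnd1 : d1.keys.Nodup := by rw [hkeys1]; exact hnd
  have hc1 : ∀ k ∈ rest, d1.contains k = true := by
    intro k hk; rw [PySem.Dict.contains_iff_mem_keys, hkeys1]; exact hkr k hk
  have e2 := pv_foldl_addc rest c2 d1 hnd1 hc1
  set d2 := rest.foldl (fun r k => r.insert k (c2 + r.getD k 0)) d1 with hd2
  have hitems2 : d2.items = row.map (fun q => (q.1, q.2 + c1 * (List.count q.1 near : Int)
      + c2 * (List.count q.1 rest : Int))) := by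
    rw [e2, e1, List.map_map]
    refine List.map_congr_left ?_
    intro p _
    simp only [Function.comp_apply]
  have hkeys2 : d2.keys = row.map Prod.fst := by
    simp only [PySem.Dict.keys, hitems2, List.map_map]
    rfl
  have hnd2 : d2.keys.Nodup := by rw [hkeys2]; exact hnd
  have hclg : d2.contains lg = true := by
    rw [PySem.Dict.contains_iff_mem_keys, hkeys2]; exact hlg
  rw [PySem.Dict.items_insert_of_contains d2 _ hclg, hitems2, List.map_map]
  refine List.map_congr_left ?_
  intro p hp
  by_cases hpl : p.1 = lg
  · have hmem : (lg, p.2 + c1 * (List.count lg near : Int) + c2 * (List.count lg rest : Int))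
        ∈ d2.items := by
      rw [hitems2]
      have : (fun q : Int × Int => (q.1, q.2 + c1 * (List.count q.1 near : Int)
          + c2 * (List.count q.1 rest : Int))) p
          = (lg, p.2 + c1 * (List.count lg near : Int) + c2 * (List.count lg rest : Int)) := by
        rw [← hpl]
      rw [← this]
      exact List.mem_map_of_mem hp
    have hv := PySem.Dict.getD_of_mem_items d2 hmem hnd2 0
    simp only [Function.comp_apply, hpl, beq_self_eq_true, if_pos, hv]
    exact congrArg (Prod.mk lg) (by ring)
  · have : (p.1 == lg) = false := by simp [hpl]
    simp only [Function.comp_apply, this, Bool.false_eq_true, hpl, if_false, add_zero]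
    ring_nf

-- ===== VERDICT (by name: the statement is the Claim_ definition above) =====
theorem cost_remote_spec : Claim_equal_cost_remote := by
  intro g initgate interval_index i no_1 no_2 no_3 no_4 target_matrix _ hpre
  obtain ⟨hmem, hlen, hndout, hndrows, hrow⟩ := hpre
  unfold Spec_cost_remote cost_remote cost_remote_alt
  split
  · rfl
  case _ idx hidx =>
  split
  · rfl
  case _ localgate hget =>
  by_cases hlg3 : localgate ∈ no_3
  · -- connect localgate to Pre_'s getD formulation
    have hidx' : interval_index.idxOf i = idx := by
      have h := PySem.List.index?_eq_idxOf? interval_index i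
      rw [h] at hidx
      have h2 := List.idxOf_eq_getD_idxOf? (a := i) (l := interval_index)
      rw [hidx] at h2
      simpa using h2
    have hgetD : g.getD (interval_index.idxOf i) 0 = localgate := by
      rw [hidx']
      rw [PySem.List.pyGet?_natCast] at hget
      simp [List.getD, hget]
    obtain ⟨hi_mem, hkeys⟩ := hrow (hgetD ▸ hlg3)
    -- the row and its facts
    set row : List (Int × Int) := (PySem.Dict.mk target_matrix).getD i [] with hrowdef
    have hndrow : (row.map Prod.fst).Nodup := by
      obtain ⟨p, hp, hp1⟩ := List.mem_map.mp hi_mem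
      have : (PySem.Dict.mk target_matrix).getD i [] = p.2 := by
        refine PySem.Dict.getD_of_mem_items _ ?_ hndout []
        have : p = (i, p.2) := by rw [← hp1]
        rw [← this]; exact hp
      rw [hrowdef, this]
      exact hndrows p hp
    have hkn : ∀ k ∈ no_1 ++ no_2, k ∈ row.map Prod.fst := fun k hk => hkeys k (by simp at hk ⊢; tauto)
    have hkr : ∀ k ∈ no_3 ++ no_4, k ∈ row.map Prod.fst := fun k hk => hkeys k (by simp at hk ⊢; tauto)
    have hlgrow : localgate ∈ row.map Prod.fst := hkr localgate (by simp [hlg3])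
    simp only [hlg3, not_true_eq_false, if_pos]
    by_cases h1 : initgate.getD 0 = 0
    · have hextra : ¬ (initgate.getD 0 ≠ 0 ∧ initgate.getD 0 ∉ no_1 ++ no_2) := by tauto
      simp only [h1, ne_eq, not_true_eq_false, if_false, hextra, if_neg]
      rw [pv_stage3 (0 * (1000 * 1000)) (10 * (1000 * 1000)) (-9 * (1000 * 1000)) localgate
        (no_1 ++ no_2) (no_3 ++ no_4) row hndrow hkn hkr hlgrow]
      rfl
    · by_cases h2 : initgate.getD 0 ∈ no_1 ++ no_2
      · have hextra : ¬ (initgate.getD 0 ≠ 0 ∧ initgate.getD 0 ∉ no_1 ++ no_2) := by tauto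
        simp only [h1, h2, ne_eq, not_true, and_false, not_false_eq_true, ite_true, ite_false]
        rw [pv_stage3 (0 * (1000 * 1000)) (10 * (1000 * 1000)) (-9 * (1000 * 1000)) localgate
          (no_1 ++ no_2) (no_3 ++ no_4) row hndrow hkn hkr hlgrow]
        rfl
      · have hextra : (initgate.getD 0 ≠ 0 ∧ initgate.getD 0 ∉ no_1 ++ no_2) := ⟨h1, h2⟩
        simp only [h1, ne_eq, not_false_eq_true, if_true, h2, if_neg, hextra, if_pos, ite_true,
          ite_false]
        rw [pv_stage3 (1 * (1000 * 1000)) (10 * (1000 * 1000)) (-10 * (1000 * 1000)) localgate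
          (no_1 ++ no_2) (no_3 ++ no_4) row hndrow hkn hkr hlgrow, ← hrowdef]
        simp only [and_self, ite_true]
        rfl
  · simp [hlg3]
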